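-- pv_equiv track=rewrite | github.com/HuyaneMatsu/Koishi | modules/snipe/action_helpers.py | build_emoji_name_invalid_message
-- ===== SOURCE A (Python) =====
-- def build_emoji_name_invalid_message(emoji_name, invalid_character_indexes):
--     """
--     Builds an error message for the case when any of the emoji name's characters are invalid.
--
--     Parameters
--     ----------
--     emoji_name : `str`
--         The emoji name in context.
--     invalid_character_indexes : `set` of `int`
--         The invalid character's indexes.
--
--     Returns
--     -------
--     error_message : `str`
--     """
--     error_message_parts = [
--         'Invalid characters in emoji name:\n```\n',
--         emoji_name,
--         '\n'
--     ]
--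
--     for index in range(len(emoji_name)):
--         if index in invalid_character_indexes:
--             sign = '^'
--         else:
--             sign = ' '
--
--         error_message_parts.append(sign)
--
--     error_message_parts.append('\n```')
--
--     return ''.join(error_message_parts)
-- ===== SOURCE B (Python) =====
-- def build_emoji_name_invalid_message(emoji_name, invalid_character_indexes):
--     marker = [' '] * len(emoji_name)
--     for index in invalid_character_indexes:
--         if 0 <= index < len(emoji_name):
--             marker[index] = '^'
--     return (
--         'Invalid characters in emoji name:\n```\n'
--         + emoji_name
--         + '\n'
--         + ''.join(marker)
--         + '\n```'
--     )
-- ===== Notes on version B (the rewrite author's own statement) =====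
-- stated objective: alternative
-- what changed: Instead of scanning every position of emoji_name and testing its membership in the invalid-index set, B allocates a space-filled marker list once and scatter-writes '^' at each in-range invalid index, then concatenates the parts directly.
import Mathlib
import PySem

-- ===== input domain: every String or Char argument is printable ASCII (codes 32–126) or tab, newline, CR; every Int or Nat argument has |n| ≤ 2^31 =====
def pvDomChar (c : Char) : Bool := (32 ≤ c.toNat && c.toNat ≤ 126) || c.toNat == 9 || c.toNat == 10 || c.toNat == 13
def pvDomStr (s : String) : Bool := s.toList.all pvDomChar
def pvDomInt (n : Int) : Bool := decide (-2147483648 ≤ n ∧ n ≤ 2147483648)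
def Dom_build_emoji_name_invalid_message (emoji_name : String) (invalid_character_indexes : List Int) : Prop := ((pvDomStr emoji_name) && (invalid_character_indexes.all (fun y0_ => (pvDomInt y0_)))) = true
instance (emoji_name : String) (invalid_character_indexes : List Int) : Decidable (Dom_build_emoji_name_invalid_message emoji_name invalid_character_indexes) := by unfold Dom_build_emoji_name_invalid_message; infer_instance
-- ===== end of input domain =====

-- B replaces A's position scan with membership tests by a space-filled marker list
-- scatter-written at the in-range invalid indexes (alternative decomposition; same cost class).


-- ===== PORT A =====
def build_emoji_name_invalid_message (emoji_name : String) (invalid_character_indexes : List Int) : String :=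
  let error_message_parts : List String :=
    ["Invalid characters in emoji name:\n```\n", emoji_name, "\n"]
  let error_message_parts :=
    (PySem.List.pyRange 0 (PySem.Str.len emoji_name) 1).foldl
      (fun parts index =>
        let sign := if index ∈ invalid_character_indexes then "^" else " "
        parts ++ [sign])
      error_message_parts
  let error_message_parts := error_message_parts ++ ["\n```"]
  PySem.Str.join "" error_message_parts

-- ===== PORT B =====
-- B: marker = [' '] * len(name); scatter '^' at each in-range invalid index; concatenate.
def build_emoji_name_invalid_message_alt (emoji_name : String) (invalid_character_indexes : List Int) : String :=
  let n : Int := PySem.Str.len emoji_name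
  let marker : List Char :=
    invalid_character_indexes.foldl
      (fun m index => if 0 ≤ index ∧ index < n then m.set index.toNat '^' else m)
      (List.replicate emoji_name.toList.length ' ')
  String.ofList ("Invalid characters in emoji name:\n```\n".toList
    ++ emoji_name.toList ++ "\n".toList ++ marker ++ "\n```".toList)

-- ===== PRECONDITION & SPEC =====
def Spec_build_emoji_name_invalid_message (emoji_name : String) (invalid_character_indexes : List Int) (out : String) : Prop := out = build_emoji_name_invalid_message_alt emoji_name invalid_character_indexes
instance (emoji_name : String) (invalid_character_indexes : List Int) (out : String) : Decidable (Spec_build_emoji_name_invalid_message emoji_name invalid_character_indexes out) := by unfold Spec_build_emoji_name_invalid_message; infer_instance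

-- ===== CLAIM (what is proved, stated in full; the proofs are below) =====
def Claim_equal_build_emoji_name_invalid_message : Prop := ∀ (emoji_name : String) (invalid_character_indexes : List Int), Dom_build_emoji_name_invalid_message emoji_name invalid_character_indexes → Spec_build_emoji_name_invalid_message emoji_name invalid_character_indexes (build_emoji_name_invalid_message emoji_name invalid_character_indexes)

-- ===== LEMMAS AND PROOFS =====

-- ''.join of parts is the flattening of their character lists.
theorem join_empty_flatten (xss : List (List Char)) :
    PySem.Chars.join [] xss = xss.flatten := by
  simp only [PySem.Chars.join, List.intercalate]
  induction xss with
  | nil => rfl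
  | cons x xs ih => cases xs <;> simp_all [List.intersperse]

-- Flattening singleton character lists is mapping.
theorem flatten_map_singleton_char (l : List Int) (g : Int → Char) :
    (l.map (fun x => [g x])).flatten = l.map g := by
  induction l with
  | nil => rfl
  | cons x xs ih => simp [ih]

-- The scatter loop preserves the length.
theorem scatter_length (idxs : List Int) (m : List Char) (n : Int) :
    (idxs.foldl (fun m index => if 0 ≤ index ∧ index < n then m.set index.toNat '^' else m) m).length
      = m.length := by
  induction idxs generalizing m with
  | nil => rfl
  | cons x xs ih => simp only [List.foldl_cons]; split <;> simp [ih]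

-- Pointwise description of B's scatter loop: position i carries '^' exactly when
-- (i : Int) is one of the indexes, else whatever the initial list carried there.
theorem scatter_getElem? (idxs : List Int) (n : Int) (m : List Char)
    (hn : n = (m.length : Int)) (i : Nat) (hi : i < m.length) :
    (idxs.foldl
      (fun m index => if 0 ≤ index ∧ index < n then m.set index.toNat '^' else m)
      m)[i]? = if (i : Int) ∈ idxs then some '^' else m[i]? := by
  induction idxs generalizing m with
  | nil => simp
  | cons x xs ih =>
    simp only [List.foldl_cons]
    by_cases hg : 0 ≤ x ∧ x < n
    · rw [if_pos hg]
      rw [ih (m.set x.toNat '^') (by simpa using hn) (by simpa using hi)]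
      by_cases hmem : (i : Int) ∈ xs
      · simp [hmem]
      · have hset := List.getElem?_set (l := m) (i := x.toNat) (j := i) (a := '^')
        by_cases hxi : (i : Int) = x
        · have : x.toNat = i := by omega
          simp [hxi, this, hi]
        · have : x.toNat ≠ i := by omega
          simp [hmem, hxi, this, hset]
    · rw [if_neg hg]
      rw [ih m hn hi]
      have hxi : (i : Int) ≠ x := by omega
      simp [hxi]

-- B's marker equals A's per-position sign list.
theorem marker_eq_signs (idxs : List Int) (n : Nat) :
    (PySem.List.pyRange 0 (n : Int) 1).map (fun index => if index ∈ idxs then '^' else ' ')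
      = idxs.foldl
          (fun m index => if 0 ≤ index ∧ index < (n : Int) then m.set index.toNat '^' else m)
          (List.replicate n ' ') := by
  apply List.ext_getElem?
  intro i
  by_cases hi : i < n
  · rw [scatter_getElem? idxs (n : Int) (List.replicate n ' ') (by simp) i (by simpa using hi)]
    have hlen : (PySem.List.pyRange 0 (n : Int) 1).length = n := by
      simp [PySem.List.length_pyRange_one]
    have hig : i < (PySem.List.pyRange 0 (n : Int) 1).length := by omega
    rw [List.getElem?_map, List.getElem?_eq_getElem hig, PySem.List.getElem_pyRange_one]
    simp only [zero_add, Option.map_some]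
    by_cases h : (i : Int) ∈ idxs <;> simp [h, hi]
  · have hlen : (PySem.List.pyRange 0 (n : Int) 1).length = n := by
      simp [PySem.List.length_pyRange_one]
    rw [List.getElem?_eq_none (by rw [List.length_map, hlen]; omega), List.getElem?_eq_none (by rw [scatter_length]; simp; omega)]

-- ===== VERDICT (by name: the statement is the Claim_ definition above) =====
theorem build_emoji_name_invalid_message_spec : Claim_equal_build_emoji_name_invalid_message := by
  intro emoji_name invalid_character_indexes _
  unfold Spec_build_emoji_name_invalid_message
  unfold build_emoji_name_invalid_message build_emoji_name_invalid_message_alt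
  apply String.toList_inj.mp
  dsimp only
  rw [PySem.List.foldl_append_singleton_eq_map]
  simp only [PySem.Str.join, PySem.Str.len_eq]
  have h0 : "".toList = ([] : List Char) := rfl
  rw [h0, join_empty_flatten]
  simp only [List.map_append, List.map_cons, List.map_map, List.map_nil, List.flatten_append,
    List.flatten_cons, List.flatten_nil, String.toList_ofList]
  have hmap : (List.map (String.toList ∘ fun index => if index ∈ invalid_character_indexes then "^" else " ")
      (PySem.List.pyRange 0 (emoji_name.toList.length : Int) 1)).flatten
      = (PySem.List.pyRange 0 (emoji_name.toList.length : Int) 1).map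
          (fun index => if index ∈ invalid_character_indexes then '^' else ' ') := by
    rw [← flatten_map_singleton_char
      (PySem.List.pyRange 0 (emoji_name.toList.length : Int) 1)
      (fun index => if index ∈ invalid_character_indexes then '^' else ' ')]
    congr 1
    apply List.map_congr_left
    intro x _
    by_cases hx : x ∈ invalid_character_indexes <;> simp [hx]
  rw [hmap, marker_eq_signs invalid_character_indexes emoji_name.toList.length]
  simp
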